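-- pv_equiv track=rewrite | github.com/syzhang/aoc | aoc_23/day02.py | count_max_balls
-- ===== SOURCE A (Python) =====
-- def count_max_balls(game_data):
--     """get max balls"""
--     # get max balls for each colour
--     max_balls = {}
--     for obs in game_data:
--         for colour, balls in obs.items():
--             if colour in max_balls:
--                 if balls > max_balls[colour]:
--                     max_balls[colour] = balls
--             else:
--                 max_balls[colour] = balls
--     return max_balls
-- ===== SOURCE B (Python) =====
-- def count_max_balls(game_data):
--     """get max balls"""
--     # gather all observed counts per colour (first-encounter key order) ...
--     groups = {}
--     for obs in game_data:
--         for colour, balls in obs.items():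
--             groups[colour] = groups.get(colour, []) + [balls]
--     # ... then reduce each colour's list with max
--     return {colour: max(counts) for colour, counts in groups.items()}
-- ===== Notes on version B (the rewrite author's own statement) =====
-- stated objective: alternative
-- what changed: Replaces the interleaved running-max accumulation with a gather-then-reduce two-pass: first group every observed count into a per-colour list, then take max of each list in a second pass.
import Mathlib
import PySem

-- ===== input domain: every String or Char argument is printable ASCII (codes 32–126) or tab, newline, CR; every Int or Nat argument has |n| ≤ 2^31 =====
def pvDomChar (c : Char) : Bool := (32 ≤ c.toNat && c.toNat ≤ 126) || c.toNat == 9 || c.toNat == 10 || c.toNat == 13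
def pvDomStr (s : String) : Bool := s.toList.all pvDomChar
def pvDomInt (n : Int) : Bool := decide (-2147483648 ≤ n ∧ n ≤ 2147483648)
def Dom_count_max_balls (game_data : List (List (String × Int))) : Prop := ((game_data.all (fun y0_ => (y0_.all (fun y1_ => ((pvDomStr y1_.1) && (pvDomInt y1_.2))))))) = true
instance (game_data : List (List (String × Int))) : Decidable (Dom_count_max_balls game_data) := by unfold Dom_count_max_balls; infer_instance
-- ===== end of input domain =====

-- B replaces A's interleaved running-max accumulation by a gather-then-reduce two-pass
-- (group all counts per colour, then max each list); alternative decomposition, same cost.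

-- ===== PORT A =====
def count_max_balls (game_data : List (List (String × Int))) : List (String × Int) :=
  (game_data.foldl (fun max_balls obs =>
    obs.foldl (fun max_balls p =>
      if max_balls.contains p.1 then
        if p.2 > max_balls.getD p.1 0 then max_balls.insert p.1 p.2 else max_balls
      else
        max_balls.insert p.1 p.2) max_balls) (PySem.Dict.empty)).items

-- ===== PORT B =====
def count_max_balls_alt (game_data : List (List (String × Int))) : List (String × Int) :=
  -- gather: groups[colour] = groups.get(colour, []) + [balls]
  let groups := game_data.foldl (fun g obs =>
    obs.foldl (fun g p => g.insert p.1 (g.getD p.1 [] ++ [p.2])) g) (PySem.Dict.empty)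
  -- reduce: {colour: max(counts) ...}; every stored list is nonempty, so max? never returns none
  groups.items.map (fun p => (p.1, (PySem.List.max? p.2 (fun y => y)).getD 0))

-- ===== PRECONDITION & SPEC =====
def Spec_count_max_balls (game_data : List (List (String × Int))) (out : List (String × Int)) : Prop := out = count_max_balls_alt game_data
instance (game_data : List (List (String × Int))) (out : List (String × Int)) : Decidable (Spec_count_max_balls game_data out) := by unfold Spec_count_max_balls; infer_instance

-- ===== CLAIM (what is proved, stated in full; the proofs are below) =====
def Claim_equal_count_max_balls : Prop := ∀ (game_data : List (List (String × Int))), Dom_count_max_balls game_data → Spec_count_max_balls game_data (count_max_balls game_data)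

-- ===== LEMMAS AND PROOFS =====

-- running max of a nonempty list (Python's max), 0 on [] (unreachable in B)
def pmax : List Int → Int
  | [] => 0
  | x :: t => t.foldl max x

def stepA (d : PySem.Dict String Int) (p : String × Int) : PySem.Dict String Int :=
  if d.contains p.1 then
    if p.2 > d.getD p.1 0 then d.insert p.1 p.2 else d
  else d.insert p.1 p.2

def stepB (g : PySem.Dict String (List Int)) (p : String × Int) : PySem.Dict String (List Int) :=
  g.insert p.1 (g.getD p.1 [] ++ [p.2])

def toMax (q : String × List Int) : String × Int := (q.1, pmax q.2)

def RInv (dA : PySem.Dict String Int) (dB : PySem.Dict String (List Int)) : Prop :=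
  dA.items = dB.items.map toMax ∧ dB.keys.Nodup ∧ ∀ q ∈ dB.items, q.2 ≠ []

theorem pmax_append (l : List Int) (b : Int) (h : l ≠ []) :
    pmax (l ++ [b]) = max (pmax l) b := by
  cases l with
  | nil => simp at h
  | cons x t => simp [pmax, List.foldl_append]

theorem inv_keys {dA : PySem.Dict String Int} {dB : PySem.Dict String (List Int)} (h : RInv dA dB) : dA.keys = dB.keys := by
  obtain ⟨h1, _, _⟩ := h
  simp only [PySem.Dict.keys, h1, List.map_map]
  rfl

theorem inv_contains {dA : PySem.Dict String Int} {dB : PySem.Dict String (List Int)} (h : RInv dA dB) (k : String) :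
    dA.contains k = dB.contains k := by
  by_cases hk : k ∈ dB.keys
  · rw [(PySem.Dict.contains_iff_mem_keys _ _).2 hk,
        (PySem.Dict.contains_iff_mem_keys _ _).2 (by rw [inv_keys h]; exact hk)]
  · have h1 : dB.contains k = false := by
      cases hc : dB.contains k with
      | false => rfl
      | true => exact absurd ((PySem.Dict.contains_iff_mem_keys _ _).1 hc) hk
    have h2 : dA.contains k = false := by
      cases hc : dA.contains k with
      | false => rfl
      | true =>
        exact absurd (by rw [← inv_keys h]; exact (PySem.Dict.contains_iff_mem_keys _ _).1 hc) hk
    rw [h1, h2]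

theorem inv_step {dA : PySem.Dict String Int} {dB : PySem.Dict String (List Int)} (h : RInv dA dB) (p : String × Int) :
    RInv (stepA dA p) (stepB dB p) := by
  obtain ⟨h1, h2, h3⟩ := h
  obtain ⟨c, b⟩ := p
  by_cases hc : dB.contains c = true
  · -- colour already present
    obtain ⟨l, hl⟩ : ∃ l, dB.get? c = some l := Option.isSome_iff_exists.1
      (by rw [← PySem.Dict.contains_eq_isSome_get? dB c]; exact hc)
    have hmem : (c, l) ∈ dB.items := PySem.Dict.mem_items_of_get?_eq_some _ hl
    have hgD : dB.getD c [] = l := PySem.Dict.getD_of_get?_eq_some _ _ hl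
    have hlne : l ≠ [] := h3 _ hmem
    have hmemA : (c, pmax l) ∈ dA.items := by
      rw [h1]; exact List.mem_map.2 ⟨(c, l), hmem, rfl⟩
    have hAkeysnd : dA.keys.Nodup := by rw [inv_keys ⟨h1, h2, h3⟩]; exact h2
    have hgDA : dA.getD c 0 = pmax l := PySem.Dict.getD_of_mem_items _ hmemA hAkeysnd _
    have hAc : dA.contains c = true := by rw [inv_contains ⟨h1, h2, h3⟩]; exact hc
    have hitemsB : (stepB dB (c, b)).items
        = dB.items.map (fun q => if q.1 == c then (c, l ++ [b]) else q) := by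
      simp only [stepB, hgD]
      exact PySem.Dict.items_insert_of_contains _ _ hc
    have hkeysB : (stepB dB (c, b)).keys = dB.keys := by
      simp only [stepB]
      exact PySem.Dict.keys_insert_of_contains _ _ hc
    have hval : ∀ q ∈ (stepB dB (c, b)).items, q.2 ≠ [] := by
      intro q hq
      rw [hitemsB] at hq
      obtain ⟨q', hq', hqe⟩ := List.mem_map.1 hq
      by_cases hq1 : q'.1 == c
      · simp [hq1] at hqe; subst hqe; simp
      · simp [hq1] at hqe; subst hqe; exact h3 _ hq'
    have hkeyeq : ∀ q ∈ dB.items, q.1 = c → q.2 = l := by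
      intro q hq hqc
      have : dB.get? q.1 = some q.2 := PySem.Dict.get?_of_mem_items _ hq h2
      rw [hqc, hl] at this
      exact (Option.some.injEq _ _ ▸ this).symm
    by_cases hb : b > pmax l
    · -- strictly larger: A overwrites
      refine ⟨?_, by rw [hkeysB]; exact h2, hval⟩
      simp only [stepA, hAc, if_true, hgDA]
      rw [if_pos hb]
      rw [PySem.Dict.items_insert_of_contains _ _ hAc, h1, hitemsB, List.map_map, List.map_map]
      apply List.map_congr_left
      intro q hq
      by_cases hq1 : q.1 = c
      · have : q.2 = l := hkeyeq q hq hq1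
        simp [Function.comp, toMax, hq1, this, pmax_append l b hlne, max_eq_right (le_of_lt hb)]
      · simp [Function.comp, toMax, hq1]
    · -- not larger: A unchanged, B's new max equals the old one
      refine ⟨?_, by rw [hkeysB]; exact h2, hval⟩
      simp only [stepA, hAc, if_true, hgDA]
      rw [if_neg hb]
      rw [h1, hitemsB, List.map_map]
      apply (List.map_congr_left ?_).symm
      intro q hq
      by_cases hq1 : q.1 = c
      · have : q.2 = l := hkeyeq q hq hq1
        simp [Function.comp, toMax, hq1, this, pmax_append l b hlne,
              max_eq_left (by omega : b ≤ pmax l)]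
      · simp [Function.comp, toMax, hq1]
  · -- fresh colour: both append
    have hcf : dB.contains c = false := by
      cases hcc : dB.contains c with
      | false => rfl
      | true => exact absurd hcc hc
    have hAc : dA.contains c = false := by rw [inv_contains ⟨h1, h2, h3⟩]; exact hcf
    have hgD : dB.getD c [] = [] := PySem.Dict.getD_of_not_contains _ _ hcf
    constructor
    · simp only [stepA, stepB, hAc, hgD, Bool.false_eq_true, if_false]
      rw [PySem.Dict.items_insert_of_not_contains _ _ hAc,
          PySem.Dict.items_insert_of_not_contains _ _ hcf, h1, List.map_append]
      simp [toMax, pmax]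
    constructor
    · simp only [stepB]
      rw [PySem.Dict.keys_insert_of_not_contains _ _ hcf]
      refine List.Nodup.append h2 (List.nodup_singleton c) ?_
      intro a ha hb'
      simp at hb'
      subst hb'
      exact absurd ((PySem.Dict.contains_iff_mem_keys _ _).2 ha) (by simp [hcf])
    · intro q hq
      simp only [stepB, hgD] at hq
      rw [PySem.Dict.items_insert_of_not_contains _ _ hcf] at hq
      rcases List.mem_append.1 hq with h' | h'
      · exact h3 _ h'
      · simp at h'; subst h'; simp

theorem inv_foldl_inner (obs : List (String × Int)) {dA : PySem.Dict String Int} {dB : PySem.Dict String (List Int)} (h : RInv dA dB) :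
    RInv (obs.foldl stepA dA) (obs.foldl stepB dB) := by
  induction obs generalizing dA dB with
  | nil => exact h
  | cons p t ih => exact ih (inv_step h p)

theorem inv_foldl_outer (gd : List (List (String × Int))) {dA : PySem.Dict String Int} {dB : PySem.Dict String (List Int)} (h : RInv dA dB) :
    RInv (gd.foldl (fun d obs => obs.foldl stepA d) dA)
        (gd.foldl (fun d obs => obs.foldl stepB d) dB) := by
  induction gd generalizing dA dB with
  | nil => exact h
  | cons obs t ih => exact ih (inv_foldl_inner obs h)

theorem max?_id_of_ne_nil (l : List Int) (h : l ≠ []) :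
    PySem.List.max? l (fun y => y) = some (pmax l) := by
  cases l with
  | nil => simp at h
  | cons x t => rw [PySem.List.max?_id_cons]; rfl

-- ===== VERDICT (by name: the statement is the Claim_ definition above) =====
theorem count_max_balls_spec : Claim_equal_count_max_balls := by
  intro gd _
  unfold Spec_count_max_balls count_max_balls count_max_balls_alt
  have hinv : RInv
      (gd.foldl (fun d obs => obs.foldl stepA d) PySem.Dict.empty)
      (gd.foldl (fun d obs => obs.foldl stepB d) PySem.Dict.empty) :=
    inv_foldl_outer gd ⟨by simp [PySem.Dict.empty],
      by simp [PySem.Dict.keys, PySem.Dict.empty],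
      by simp [PySem.Dict.empty]⟩
  obtain ⟨h1, _, h3⟩ := hinv
  show (gd.foldl (fun d obs => obs.foldl stepA d) PySem.Dict.empty).items = _
  rw [h1]
  apply List.map_congr_left
  intro q hq
  rw [max?_id_of_ne_nil q.2 (h3 q hq)]
  rfl
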